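-- pv_equiv track=rewrite | github.com/ccastleee/readme | Clase 13/simulacro_final.py | rango_edades
-- ===== SOURCE A (Python) =====
-- def rango_edades(lista):
--     cont_1 = 0
--     cont_2 = 0
--     cont_3 = 0
--     for i in range(len(lista)):
--         if lista[i] >= 0 and lista[i] <= 2:
--             cont_1 += 1
--         elif lista[i] >= 3 and lista[i] <= 12:
--             cont_2 += 1
--         else:
--             cont_3 += 1
--     return cont_1, cont_2, cont_3
-- ===== SOURCE B (Python) =====
-- def rango_edades(lista):
--     cont_1 = sum(1 for x in lista if 0 <= x <= 2)
--     cont_2 = sum(1 for x in lista if 3 <= x <= 12)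
--     cont_3 = len(lista) - cont_1 - cont_2
--     return cont_1, cont_2, cont_3
-- ===== Notes on version B (the rewrite author's own statement) =====
-- stated objective: simpler
-- what changed: Replaces the single indexed loop with three-way branching by two independent filtered counts, deriving the third bucket arithmetically as the complement of the total.
import Mathlib
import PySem

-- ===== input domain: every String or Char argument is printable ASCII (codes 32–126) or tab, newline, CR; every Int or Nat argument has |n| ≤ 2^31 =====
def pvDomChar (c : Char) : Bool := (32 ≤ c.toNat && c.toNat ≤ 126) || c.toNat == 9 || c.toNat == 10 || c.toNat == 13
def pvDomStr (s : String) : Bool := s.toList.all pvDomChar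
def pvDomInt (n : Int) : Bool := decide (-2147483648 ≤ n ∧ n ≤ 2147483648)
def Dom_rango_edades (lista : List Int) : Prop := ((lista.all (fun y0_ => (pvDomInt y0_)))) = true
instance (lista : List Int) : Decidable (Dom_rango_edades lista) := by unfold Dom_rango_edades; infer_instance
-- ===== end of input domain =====

-- B replaces A's single three-branch loop by two filtered counts plus a len-based complement (objective: simpler).

-- ===== PORT A =====
-- A: one loop over range(len(lista)) with three counters updated by an if/elif/else chain.
def rango_edades (lista : List Int) : Int × Int × Int :=
  (PySem.List.pyRange 0 (lista.length : Int) 1).foldl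
    (fun (c : Int × Int × Int) i =>
      let x := PySem.List.pyGetD lista i 0
      if x ≥ 0 ∧ x ≤ 2 then (c.1 + 1, c.2.1, c.2.2)
      else if x ≥ 3 ∧ x ≤ 12 then (c.1, c.2.1 + 1, c.2.2)
      else (c.1, c.2.1, c.2.2 + 1))
    (0, 0, 0)

-- ===== PORT B =====
-- B: two independent filtered counts; third bucket by complement.
def rango_edades_alt (lista : List Int) : Int × Int × Int :=
  let cont_1 : Int := ((lista.filter (fun x => 0 ≤ x ∧ x ≤ 2)).length : Int)
  let cont_2 : Int := ((lista.filter (fun x => 3 ≤ x ∧ x ≤ 12)).length : Int)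
  let cont_3 : Int := (lista.length : Int) - cont_1 - cont_2
  (cont_1, cont_2, cont_3)

-- ===== PRECONDITION & SPEC =====
def Spec_rango_edades (lista : List Int) (out : Int × Int × Int) : Prop := out = rango_edades_alt lista
instance (lista : List Int) (out : Int × Int × Int) : Decidable (Spec_rango_edades lista out) := by unfold Spec_rango_edades; infer_instance

-- ===== CLAIM (what is proved, stated in full; the proofs are below) =====
def Claim_equal_rango_edades : Prop := ∀ (lista : List Int), Dom_rango_edades lista → Spec_rango_edades lista (rango_edades lista)

-- ===== LEMMAS AND PROOFS =====

-- A's indexed loop equals a structural fold over the list.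
theorem rango_edades_eq_fold (lista : List Int) :
    rango_edades lista =
      lista.foldl
        (fun (c : Int × Int × Int) x =>
          if x ≥ 0 ∧ x ≤ 2 then (c.1 + 1, c.2.1, c.2.2)
          else if x ≥ 3 ∧ x ≤ 12 then (c.1, c.2.1 + 1, c.2.2)
          else (c.1, c.2.1, c.2.2 + 1))
        (0, 0, 0) := by
  unfold rango_edades
  exact PySem.List.foldl_pyRange_zero_pyGetD' lista 0
    (fun c x =>
      if x ≥ 0 ∧ x ≤ 2 then (c.1 + 1, c.2.1, c.2.2)
      else if x ≥ 3 ∧ x ≤ 12 then (c.1, c.2.1 + 1, c.2.2)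
      else (c.1, c.2.1, c.2.2 + 1)) (0, 0, 0)

theorem fold_counts (lista : List Int) (a b c : Int) :
    lista.foldl
        (fun (c : Int × Int × Int) x =>
          if x ≥ 0 ∧ x ≤ 2 then (c.1 + 1, c.2.1, c.2.2)
          else if x ≥ 3 ∧ x ≤ 12 then (c.1, c.2.1 + 1, c.2.2)
          else (c.1, c.2.1, c.2.2 + 1))
        (a, b, c)
    = (a + ((lista.filter (fun x => 0 ≤ x ∧ x ≤ 2)).length : Int),
       b + ((lista.filter (fun x => 3 ≤ x ∧ x ≤ 12)).length : Int),
       c + ((lista.length : Int)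
            - ((lista.filter (fun x => 0 ≤ x ∧ x ≤ 2)).length : Int)
            - ((lista.filter (fun x => 3 ≤ x ∧ x ≤ 12)).length : Int))) := by
  induction lista generalizing a b c with
  | nil => simp
  | cons y t ih =>
    simp only [List.foldl_cons, List.filter_cons, List.length_cons]
    by_cases h1 : 0 ≤ y ∧ y ≤ 2 <;> by_cases h2 : 3 ≤ y ∧ y ≤ 12
    all_goals simp only [ge_iff_le, h1, h2, true_and, false_and,
      decide_true, decide_false, if_true, if_false, ih, Prod.mk.injEq, List.length_cons,
      decide_eq_true_eq, and_self]
    all_goals first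
      | (exfalso; omega)
      | (split_ifs <;> simp_all <;> push_cast <;> omega)

-- ===== VERDICT (by name: the statement is the Claim_ definition above) =====
theorem rango_edades_spec : Claim_equal_rango_edades := by
  intro lista _
  show rango_edades lista = rango_edades_alt lista
  rw [rango_edades_eq_fold, fold_counts]
  simp [rango_edades_alt]
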